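-- pv_equiv track=rewrite | github.com/landhomestexas/property-extractor | scripts/import_county_parcels.py | detect_property_fields
-- ===== SOURCE A (Python) =====
-- def detect_property_fields(sample_props):
--     """Detect the field mapping based on sample properties"""
--     field_mapping = {}
--
--     # Common field variations
--     prop_id_fields = ['Prop_ID', 'PROP_ID', 'prop_id', 'PROPERTY_ID', 'property_id', 'ID', 'id']
--     owner_fields = ['OWNER_NAME', 'owner_name', 'Owner_Name', 'OWNER', 'owner']
--     situs_fields = ['SITUS_ADDR', 'situs_addr', 'Situs_Addr', 'SITUS_ADDRESS', 'ADDRESS', 'address']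
--     mail_fields = ['MAIL_ADDR', 'mail_addr', 'Mail_Addr', 'MAIL_ADDRESS', 'MAILING_ADDRESS']
--     land_value_fields = ['LAND_VALUE', 'land_value', 'Land_Value', 'LANDVALUE']
--     mkt_value_fields = ['MKT_VALUE', 'mkt_value', 'Market_Value', 'MARKET_VALUE', 'MKTVALUE']
--     area_fields = ['GIS_AREA', 'gis_area', 'Gis_Area', 'AREA', 'area', 'ACREAGE', 'acreage']
--
--     # Find matching fields
--     for field in prop_id_fields:
--         if field in sample_props:
--             field_mapping['prop_id'] = field
--             break
--
--     for field in owner_fields: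
--         if field in sample_props:
--             field_mapping['owner_name'] = field
--             break
--
--     for field in situs_fields:
--         if field in sample_props:
--             field_mapping['situs_addr'] = field
--             break
--
--     for field in mail_fields:
--         if field in sample_props:
--             field_mapping['mail_addr'] = field
--             break
--
--     for field in land_value_fields:
--         if field in sample_props:
--             field_mapping['land_value'] = field
--             break
--
--     for field in mkt_value_fields:
--         if field in sample_props:
--             field_mapping['mkt_value'] = field
--             break
--
--     for field in area_fields:
--         if field in sample_props:
--             field_mapping['gis_area'] = field
--             break
--
--     return field_mapping
-- ===== SOURCE B (Python) =====
-- _FIELD_TABLE = [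
--     ('prop_id', ['Prop_ID', 'PROP_ID', 'prop_id', 'PROPERTY_ID', 'property_id', 'ID', 'id']),
--     ('owner_name', ['OWNER_NAME', 'owner_name', 'Owner_Name', 'OWNER', 'owner']),
--     ('situs_addr', ['SITUS_ADDR', 'situs_addr', 'Situs_Addr', 'SITUS_ADDRESS', 'ADDRESS', 'address']),
--     ('mail_addr', ['MAIL_ADDR', 'mail_addr', 'Mail_Addr', 'MAIL_ADDRESS', 'MAILING_ADDRESS']),
--     ('land_value', ['LAND_VALUE', 'land_value', 'Land_Value', 'LANDVALUE']),
--     ('mkt_value', ['MKT_VALUE', 'mkt_value', 'Market_Value', 'MARKET_VALUE', 'MKTVALUE']),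
--     ('gis_area', ['GIS_AREA', 'gis_area', 'Gis_Area', 'AREA', 'area', 'ACREAGE', 'acreage']),
-- ]
--
-- # Inverted index: candidate field name -> (target key, rank within its candidate list).
-- _CANON = {}
-- _TARGETS = []
-- for _t, _cands in _FIELD_TABLE:
--     _TARGETS.append(_t)
--     for _r, _name in enumerate(_cands):
--         _CANON[_name] = (_t, _r)
--
--
-- def detect_property_fields(sample_props):
--     # Single pass over the input keys, keeping the lowest-ranked hit per target;
--     # the lowest rank is exactly the first candidate A's scan would find.
--     best = {}
--     for key in sample_props:
--         hit = _CANON.get(key)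
--         if hit is not None:
--             target, rank = hit
--             cur = best.get(target)
--             if cur is None or rank < cur[0]:
--                 best[target] = (rank, key)
--     return {t: best[t][1] for t in _TARGETS if t in best}
-- ===== Notes on version B (the rewrite author's own statement) =====
-- stated objective: alternative
-- what changed: Instead of scanning seven candidate lists against the input mapping with first-match breaks, B builds an inverted candidate->(target,rank) index once and makes a single pass over the input keys, keeping the lowest-ranked hit per target and emitting targets in fixed order.
import Mathlib
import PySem

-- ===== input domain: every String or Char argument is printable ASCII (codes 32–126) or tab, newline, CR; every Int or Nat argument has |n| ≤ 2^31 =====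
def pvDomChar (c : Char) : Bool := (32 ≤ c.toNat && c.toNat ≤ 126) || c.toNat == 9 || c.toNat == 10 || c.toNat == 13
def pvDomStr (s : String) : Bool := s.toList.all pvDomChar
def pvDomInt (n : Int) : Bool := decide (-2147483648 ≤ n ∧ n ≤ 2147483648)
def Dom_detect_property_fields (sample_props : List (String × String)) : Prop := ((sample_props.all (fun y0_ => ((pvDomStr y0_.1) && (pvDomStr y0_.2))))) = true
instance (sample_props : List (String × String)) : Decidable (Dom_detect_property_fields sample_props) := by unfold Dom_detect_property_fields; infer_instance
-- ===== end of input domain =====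

-- B replaces A's seven candidate-list scans by a single pass over the input keys through an
-- inverted candidate→(target, rank) index, keeping the lowest-ranked hit per target (simpler traversal).

-- ===== PORT A =====
-- one 'for field in …: if field in sample_props: field_mapping[target] = field; break' loop of A
def pvALoop (sample_props : List (String × String)) (fm : PySem.Dict String String)
    (target : String) : List String → PySem.Dict String String
  | [] => fm
  | f :: rest =>
    if sample_props.any (fun kv => kv.1 == f) then fm.insert target f
    else pvALoop sample_props fm target rest

def detect_property_fields (sample_props : List (String × String)) : List (String × String) :=
  let fm : PySem.Dict String String := PySem.Dict.empty
  let fm := pvALoop sample_props fm "prop_id" ["Prop_ID", "PROP_ID", "prop_id", "PROPERTY_ID", "property_id", "ID", "id"]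
  let fm := pvALoop sample_props fm "owner_name" ["OWNER_NAME", "owner_name", "Owner_Name", "OWNER", "owner"]
  let fm := pvALoop sample_props fm "situs_addr" ["SITUS_ADDR", "situs_addr", "Situs_Addr", "SITUS_ADDRESS", "ADDRESS", "address"]
  let fm := pvALoop sample_props fm "mail_addr" ["MAIL_ADDR", "mail_addr", "Mail_Addr", "MAIL_ADDRESS", "MAILING_ADDRESS"]
  let fm := pvALoop sample_props fm "land_value" ["LAND_VALUE", "land_value", "Land_Value", "LANDVALUE"]
  let fm := pvALoop sample_props fm "mkt_value" ["MKT_VALUE", "mkt_value", "Market_Value", "MARKET_VALUE", "MKTVALUE"]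
  let fm := pvALoop sample_props fm "gis_area" ["GIS_AREA", "gis_area", "Gis_Area", "AREA", "area", "ACREAGE", "acreage"]
  fm.items

-- ===== PORT B =====
-- module-level inverted index _CANON : candidate name -> (target, rank)  (Source B builds it once at import)
def pvCanon : PySem.Dict String (String × Nat) := PySem.Dict.mk
  [("Prop_ID", ("prop_id", 0)), ("PROP_ID", ("prop_id", 1)), ("prop_id", ("prop_id", 2)),
   ("PROPERTY_ID", ("prop_id", 3)), ("property_id", ("prop_id", 4)), ("ID", ("prop_id", 5)), ("id", ("prop_id", 6)),
   ("OWNER_NAME", ("owner_name", 0)), ("owner_name", ("owner_name", 1)), ("Owner_Name", ("owner_name", 2)),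
   ("OWNER", ("owner_name", 3)), ("owner", ("owner_name", 4)),
   ("SITUS_ADDR", ("situs_addr", 0)), ("situs_addr", ("situs_addr", 1)), ("Situs_Addr", ("situs_addr", 2)),
   ("SITUS_ADDRESS", ("situs_addr", 3)), ("ADDRESS", ("situs_addr", 4)), ("address", ("situs_addr", 5)),
   ("MAIL_ADDR", ("mail_addr", 0)), ("mail_addr", ("mail_addr", 1)), ("Mail_Addr", ("mail_addr", 2)),
   ("MAIL_ADDRESS", ("mail_addr", 3)), ("MAILING_ADDRESS", ("mail_addr", 4)),
   ("LAND_VALUE", ("land_value", 0)), ("land_value", ("land_value", 1)), ("Land_Value", ("land_value", 2)),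
   ("LANDVALUE", ("land_value", 3)),
   ("MKT_VALUE", ("mkt_value", 0)), ("mkt_value", ("mkt_value", 1)), ("Market_Value", ("mkt_value", 2)),
   ("MARKET_VALUE", ("mkt_value", 3)), ("MKTVALUE", ("mkt_value", 4)),
   ("GIS_AREA", ("gis_area", 0)), ("gis_area", ("gis_area", 1)), ("Gis_Area", ("gis_area", 2)),
   ("AREA", ("gis_area", 3)), ("area", ("gis_area", 4)), ("ACREAGE", ("gis_area", 5)), ("acreage", ("gis_area", 6))]

def pvTargets : List String :=
  ["prop_id", "owner_name", "situs_addr", "mail_addr", "land_value", "mkt_value", "gis_area"]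

-- loop body of Source B's single pass over the input keys
def pvStep (best : PySem.Dict String (Nat × String)) (kv : String × String) :
    PySem.Dict String (Nat × String) :=
  match PySem.Dict.get? pvCanon kv.1 with
  | some tr =>
    match PySem.Dict.get? best tr.1 with
    | some cur => if tr.2 < cur.1 then best.insert tr.1 (tr.2, kv.1) else best
    | none => best.insert tr.1 (tr.2, kv.1)
  | none => best

def detect_property_fields_alt (sample_props : List (String × String)) : List (String × String) :=
  let best := sample_props.foldl pvStep (PySem.Dict.empty : PySem.Dict String (Nat × String))
  -- {t: best[t][1] for t in _TARGETS if t in best}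
  (pvTargets.foldl (fun out t =>
      match PySem.Dict.get? best t with
      | some rk => out.insert t rk.2
      | none => out) (PySem.Dict.empty : PySem.Dict String String)).items

-- ===== PRECONDITION & SPEC =====
def Spec_detect_property_fields (sample_props : List (String × String)) (out : List (String × String)) : Prop := out = detect_property_fields_alt sample_props
instance (sample_props : List (String × String)) (out : List (String × String)) : Decidable (Spec_detect_property_fields sample_props out) := by unfold Spec_detect_property_fields; infer_instance

-- ===== CLAIM (what is proved, stated in full; the proofs are below) =====
def Claim_equal_detect_property_fields : Prop := ∀ (sample_props : List (String × String)), Dom_detect_property_fields sample_props → Spec_detect_property_fields sample_props (detect_property_fields sample_props)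

-- ===== LEMMAS AND PROOFS =====

-- A's break-loop computes exactly 'first matching candidate, if any'.
theorem pvALoop_eq_find (sample_props : List (String × String)) (fm : PySem.Dict String String)
    (target : String) (cands : List String) :
    pvALoop sample_props fm target cands =
      match cands.find? (fun f => sample_props.any (fun kv => kv.1 == f)) with
      | some m => fm.insert target m
      | none => fm := by
  induction cands with
  | nil => rfl
  | cons f rest ih =>
    by_cases h : sample_props.any (fun kv => kv.1 == f) = true
    · simp [pvALoop, List.find?, h]
    · simp [pvALoop, List.find?, h, ih]

-- 'keep the old hit unless the new one has strictly smaller rank' (Source B's update rule)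
def pvMerge : Option (Nat × String) → Option (Nat × String) → Option (Nat × String)
  | o, none => o
  | none, some h => some h
  | some c, some h => if h.1 < c.1 then some h else some c

-- the hit (rank, key) that one input pair contributes to target t
def pvHit (t : String) (kv : String × String) : Option (Nat × String) :=
  match PySem.Dict.get? pvCanon kv.1 with
  | some tr => if tr.1 == t then some (tr.2, kv.1) else none
  | none => none

-- first entry of a ranked candidate list satisfying the predicate
def pvFind (p : String → Bool) (es : List (Nat × String)) : Option (Nat × String) :=
  es.find? (fun e => p e.2)

theorem pvMerge_none_left (h : Option (Nat × String)) : pvMerge none h = h := by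
  cases h <;> rfl

theorem pvMerge_assoc (a b c : Option (Nat × String)) :
    pvMerge (pvMerge a b) c = pvMerge a (pvMerge b c) := by
  cases a with
  | none => cases b <;> cases c <;> simp only [pvMerge] <;> (try rfl) <;> split <;> rfl
  | some a =>
    cases b with
    | none => cases c <;> simp [pvMerge]
    | some b =>
      cases c with
      | none => simp [pvMerge]
      | some c =>
        by_cases h1 : b.1 < a.1 <;> by_cases h2 : c.1 < b.1 <;> by_cases h3 : c.1 < a.1 <;>
          simp [pvMerge, h1, h2, h3] <;> omega

-- one step of the fold on the best-dict is a pvMerge on the tracked target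
theorem pvStep_get? (d : PySem.Dict String (Nat × String)) (kv : String × String) (t : String) :
    PySem.Dict.get? (pvStep d kv) t = pvMerge (PySem.Dict.get? d t) (pvHit t kv) := by
  unfold pvStep pvHit
  cases h : PySem.Dict.get? pvCanon kv.1 with
  | none => cases PySem.Dict.get? d t <;> rfl
  | some tr =>
    by_cases ht : tr.1 = t
    · subst ht
      simp only [beq_self_eq_true, if_true]
      cases hc : PySem.Dict.get? d tr.1 with
      | none => simp [PySem.Dict.get?_insert_self, hc, pvMerge]
      | some cur =>
        by_cases hlt : tr.2 < cur.1
        · simp [hlt, PySem.Dict.get?_insert_self, hc, pvMerge]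
        · simp [hlt, hc, pvMerge]
    · have hbeq : (tr.1 == t) = false := by simp [ht]
      simp only [hbeq, if_false]
      cases hc : PySem.Dict.get? d tr.1 with
      | none =>
        have hne : ¬ t = tr.1 := fun hh => ht hh.symm
        simp only [PySem.Dict.get?_insert, if_neg hne]
        cases PySem.Dict.get? d t <;> simp [pvMerge]
      | some cur =>
        by_cases hlt : tr.2 < cur.1
        · have hne : ¬ t = tr.1 := fun hh => ht hh.symm
          simp only [hlt, if_true, PySem.Dict.get?_insert, if_neg hne]
          cases PySem.Dict.get? d t <;> simp [pvMerge]
        · simp only [hlt, if_false]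
          cases PySem.Dict.get? d t <;> simp [pvMerge]

-- the whole fold, seen through get? at target t
theorem pvFold_get? (xs : List (String × String)) (d : PySem.Dict String (Nat × String)) (t : String) :
    PySem.Dict.get? (xs.foldl pvStep d) t =
      xs.foldl (fun o kv => pvMerge o (pvHit t kv)) (PySem.Dict.get? d t) := by
  induction xs generalizing d with
  | nil => rfl
  | cons kv xs ih => simp only [List.foldl_cons, ih, pvStep_get?]

-- find? over a strengthened predicate, when s is not among the candidates
theorem pvFind_not_mem (s : String) (p : String → Bool) (es : List (Nat × String))
    (hs : s ∉ es.map (·.2)) :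
    pvFind (fun f => (s == f) || p f) es = pvFind p es := by
  induction es with
  | nil => rfl
  | cons e rest ih =>
    simp only [List.map_cons, List.mem_cons, not_or] at hs
    have hne : (s == e.2) = false := by simp [hs.1]
    by_cases hp : p e.2 = true
    · simp [pvFind, List.find?, hne, hp]
    · simp only [pvFind, List.find?] at ih ⊢
      simp [hne, hp, ih hs.2]

-- find? over a strengthened predicate, when s is the candidate of rank r
theorem pvFind_mem (s : String) (r : Nat) (p : String → Bool) (es : List (Nat × String))
    (hpw : es.Pairwise (fun a b => a.1 < b.1)) (hnd : (es.map (·.2)).Nodup)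
    (hmem : (r, s) ∈ es) :
    pvFind (fun f => (s == f) || p f) es = pvMerge (some (r, s)) (pvFind p es) := by
  induction es with
  | nil => simp at hmem
  | cons e rest ih =>
    rw [List.pairwise_cons] at hpw
    simp only [List.map_cons, List.nodup_cons] at hnd
    rcases List.mem_cons.mp hmem with he | hrest
    · subst he
      have hhead : ((s == s) || p s) = true := by simp
      by_cases hp : p s = true
      · simp [pvFind, List.find?, hp, pvMerge]
      · simp only [pvFind, List.find?, hhead, hp]
        simp only [show (s == s) = true by simp, Bool.true_or, cond_true,
          Bool.false_eq_true, cond_false]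
        cases hf : List.find? (fun e => p e.2) rest with
        | none => rfl
        | some c =>
          have hc : c ∈ rest := List.mem_of_find?_eq_some hf
          have : r < c.1 := hpw.1 c hc
          simp [pvMerge, Nat.not_lt.mpr (Nat.le_of_lt this)]
    · have hsne : e.2 ≠ s := by
        intro h
        exact hnd.1 (h ▸ (List.mem_map.mpr ⟨(r, s), hrest, rfl⟩))
      have hne : (s == e.2) = false := by simp [Ne.symm hsne]
      by_cases hp : p e.2 = true
      · have hlt : e.1 < r := hpw.1 (r, s) hrest
        simp [pvFind, List.find?, hne, hp, pvMerge, hlt]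
      · simp only [pvFind, List.find?, hne, Bool.false_or, hp, Bool.false_eq_true, cond_false]
        exact ih hpw.2 hnd.2 hrest

-- the per-target closed form of Source B's single pass, generic in the ranked list es
theorem pvFoldMerge_eq_find (t : String) (es : List (Nat × String))
    (hpw : es.Pairwise (fun a b => a.1 < b.1)) (hnd : (es.map (·.2)).Nodup)
    (hcf : ∀ q ∈ (PySem.Dict.items pvCanon), (q.2.1 = t → (q.2.2, q.1) ∈ es) ∧ (q.2.1 ≠ t → q.1 ∉ es.map (·.2)))
    (hall : ∀ f ∈ es.map (·.2), (PySem.Dict.get? pvCanon f).isSome = true) :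
    ∀ (xs : List (String × String)) (o : Option (Nat × String)),
      xs.foldl (fun o kv => pvMerge o (pvHit t kv)) o =
        pvMerge o (pvFind (fun f => xs.any (fun kv => kv.1 == f)) es) := by
  intro xs
  induction xs with
  | nil =>
    intro o
    have hnone : pvFind (fun f => ([] : List (String × String)).any (fun kv => kv.1 == f)) es = none := by
      apply List.find?_eq_none.mpr; intro a _; simp
    simp only [List.foldl_nil]
    rw [hnone]
    cases o <;> rfl
  | cons kv xs ih =>
    intro o
    have hsplit : pvFind (fun f => (kv :: xs).any (fun kv' => kv'.1 == f)) es =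
        pvMerge (pvHit t kv) (pvFind (fun f => xs.any (fun kv' => kv'.1 == f)) es) := by
      unfold pvHit
      cases h : PySem.Dict.get? pvCanon kv.1 with
      | none =>
        have hnm : kv.1 ∉ es.map (·.2) := by
          intro hm
          have := hall kv.1 hm
          simp [h] at this
        rw [pvMerge_none_left]
        have := pvFind_not_mem kv.1 (fun f => xs.any (fun kv' => kv'.1 == f)) es hnm
        simpa [List.any_cons] using this
      | some tr =>
        have hq := hcf (kv.1, tr) (PySem.Dict.mem_items_of_get?_eq_some _ h)
        by_cases ht : tr.1 = t
        · have hmem : (tr.2, kv.1) ∈ es := hq.1 ht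
          have := pvFind_mem kv.1 tr.2 (fun f => xs.any (fun kv' => kv'.1 == f)) es hpw hnd hmem
          simp only [ht, beq_self_eq_true, if_true]
          simpa [List.any_cons] using this
        · have hnm : kv.1 ∉ es.map (·.2) := hq.2 ht
          have hbeq : (tr.1 == t) = false := by simp [ht]
          simp only [hbeq, Bool.false_eq_true, if_false]
          rw [pvMerge_none_left]
          have := pvFind_not_mem kv.1 (fun f => xs.any (fun kv' => kv'.1 == f)) es hnm
          simpa [List.any_cons] using this
    simp only [List.foldl_cons]
    rw [ih, hsplit, pvMerge_assoc]

-- projecting the annotated find? back to A's plain find?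
theorem pvFind_map_snd (p : String → Bool) (es : List (Nat × String)) :
    (es.map (·.2)).find? p = (pvFind p es).map (·.2) := by
  induction es with
  | nil => rfl
  | cons e rest ih =>
    by_cases hp : p e.2 = true
    · simp [pvFind, List.find?, hp]
    · simp only [List.map_cons, List.find?, hp, Bool.false_eq_true, cond_false, pvFind] at ih ⊢
      exact ih

-- best.get? t for the concrete target t with ranked candidates es (cands = es.map snd)
theorem pvBest_get? (sample_props : List (String × String)) (t : String) (es : List (Nat × String))
    (hpw : es.Pairwise (fun a b => a.1 < b.1)) (hnd : (es.map (·.2)).Nodup)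
    (hcf : ∀ q ∈ (PySem.Dict.items pvCanon), (q.2.1 = t → (q.2.2, q.1) ∈ es) ∧ (q.2.1 ≠ t → q.1 ∉ es.map (·.2)))
    (hall : ∀ f ∈ es.map (·.2), (PySem.Dict.get? pvCanon f).isSome = true) :
    PySem.Dict.get? (sample_props.foldl pvStep (PySem.Dict.empty : PySem.Dict String (Nat × String))) t =
      pvFind (fun f => sample_props.any (fun kv => kv.1 == f)) es := by
  rw [pvFold_get?, PySem.Dict.get?_empty, pvFoldMerge_eq_find t es hpw hnd hcf hall, pvMerge_none_left]

-- one output stage, rewritten through the annotated find?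
theorem pvStage_eq (fm : PySem.Dict String String) (t : String) (F : Option (Nat × String)) :
    (match F.map (·.2) with
     | some m => fm.insert t m
     | none => fm) =
    (match F with
     | some rk => fm.insert t rk.2
     | none => fm) := by
  cases F <;> rfl

-- ranked candidate lists of the seven targets, used only by the proofs below

def pvEs1 : List (Nat × String) := [(0,"Prop_ID"),(1,"PROP_ID"),(2,"prop_id"),(3,"PROPERTY_ID"),(4,"property_id"),(5,"ID"),(6,"id")]

theorem pvStageEq1 (sample_props : List (String × String)) (fm : PySem.Dict String String) :
    pvALoop sample_props fm "prop_id" ["Prop_ID", "PROP_ID", "prop_id", "PROPERTY_ID", "property_id", "ID", "id"] =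
    (match PySem.Dict.get? (sample_props.foldl pvStep (PySem.Dict.empty : PySem.Dict String (Nat × String))) "prop_id" with
     | some rk => fm.insert "prop_id" rk.2
     | none => fm) := by
  rw [pvALoop_eq_find,
    pvBest_get? sample_props "prop_id" pvEs1 (by decide) (by decide) (by decide) (by decide),
    show ["Prop_ID", "PROP_ID", "prop_id", "PROPERTY_ID", "property_id", "ID", "id"] = pvEs1.map (·.2) from rfl,
    pvFind_map_snd]
  exact pvStage_eq fm "prop_id" _

def pvEs2 : List (Nat × String) := [(0,"OWNER_NAME"),(1,"owner_name"),(2,"Owner_Name"),(3,"OWNER"),(4,"owner")]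

theorem pvStageEq2 (sample_props : List (String × String)) (fm : PySem.Dict String String) :
    pvALoop sample_props fm "owner_name" ["OWNER_NAME", "owner_name", "Owner_Name", "OWNER", "owner"] =
    (match PySem.Dict.get? (sample_props.foldl pvStep (PySem.Dict.empty : PySem.Dict String (Nat × String))) "owner_name" with
     | some rk => fm.insert "owner_name" rk.2
     | none => fm) := by
  rw [pvALoop_eq_find,
    pvBest_get? sample_props "owner_name" pvEs2 (by decide) (by decide) (by decide) (by decide),
    show ["OWNER_NAME", "owner_name", "Owner_Name", "OWNER", "owner"] = pvEs2.map (·.2) from rfl,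
    pvFind_map_snd]
  exact pvStage_eq fm "owner_name" _

def pvEs3 : List (Nat × String) := [(0,"SITUS_ADDR"),(1,"situs_addr"),(2,"Situs_Addr"),(3,"SITUS_ADDRESS"),(4,"ADDRESS"),(5,"address")]

theorem pvStageEq3 (sample_props : List (String × String)) (fm : PySem.Dict String String) :
    pvALoop sample_props fm "situs_addr" ["SITUS_ADDR", "situs_addr", "Situs_Addr", "SITUS_ADDRESS", "ADDRESS", "address"] =
    (match PySem.Dict.get? (sample_props.foldl pvStep (PySem.Dict.empty : PySem.Dict String (Nat × String))) "situs_addr" with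
     | some rk => fm.insert "situs_addr" rk.2
     | none => fm) := by
  rw [pvALoop_eq_find,
    pvBest_get? sample_props "situs_addr" pvEs3 (by decide) (by decide) (by decide) (by decide),
    show ["SITUS_ADDR", "situs_addr", "Situs_Addr", "SITUS_ADDRESS", "ADDRESS", "address"] = pvEs3.map (·.2) from rfl,
    pvFind_map_snd]
  exact pvStage_eq fm "situs_addr" _

def pvEs4 : List (Nat × String) := [(0,"MAIL_ADDR"),(1,"mail_addr"),(2,"Mail_Addr"),(3,"MAIL_ADDRESS"),(4,"MAILING_ADDRESS")]

theorem pvStageEq4 (sample_props : List (String × String)) (fm : PySem.Dict String String) :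
    pvALoop sample_props fm "mail_addr" ["MAIL_ADDR", "mail_addr", "Mail_Addr", "MAIL_ADDRESS", "MAILING_ADDRESS"] =
    (match PySem.Dict.get? (sample_props.foldl pvStep (PySem.Dict.empty : PySem.Dict String (Nat × String))) "mail_addr" with
     | some rk => fm.insert "mail_addr" rk.2
     | none => fm) := by
  rw [pvALoop_eq_find,
    pvBest_get? sample_props "mail_addr" pvEs4 (by decide) (by decide) (by decide) (by decide),
    show ["MAIL_ADDR", "mail_addr", "Mail_Addr", "MAIL_ADDRESS", "MAILING_ADDRESS"] = pvEs4.map (·.2) from rfl,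
    pvFind_map_snd]
  exact pvStage_eq fm "mail_addr" _

def pvEs5 : List (Nat × String) := [(0,"LAND_VALUE"),(1,"land_value"),(2,"Land_Value"),(3,"LANDVALUE")]

theorem pvStageEq5 (sample_props : List (String × String)) (fm : PySem.Dict String String) :
    pvALoop sample_props fm "land_value" ["LAND_VALUE", "land_value", "Land_Value", "LANDVALUE"] =
    (match PySem.Dict.get? (sample_props.foldl pvStep (PySem.Dict.empty : PySem.Dict String (Nat × String))) "land_value" with
     | some rk => fm.insert "land_value" rk.2
     | none => fm) := by
  rw [pvALoop_eq_find,
    pvBest_get? sample_props "land_value" pvEs5 (by decide) (by decide) (by decide) (by decide),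
    show ["LAND_VALUE", "land_value", "Land_Value", "LANDVALUE"] = pvEs5.map (·.2) from rfl,
    pvFind_map_snd]
  exact pvStage_eq fm "land_value" _

def pvEs6 : List (Nat × String) := [(0,"MKT_VALUE"),(1,"mkt_value"),(2,"Market_Value"),(3,"MARKET_VALUE"),(4,"MKTVALUE")]

theorem pvStageEq6 (sample_props : List (String × String)) (fm : PySem.Dict String String) :
    pvALoop sample_props fm "mkt_value" ["MKT_VALUE", "mkt_value", "Market_Value", "MARKET_VALUE", "MKTVALUE"] =
    (match PySem.Dict.get? (sample_props.foldl pvStep (PySem.Dict.empty : PySem.Dict String (Nat × String))) "mkt_value" with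
     | some rk => fm.insert "mkt_value" rk.2
     | none => fm) := by
  rw [pvALoop_eq_find,
    pvBest_get? sample_props "mkt_value" pvEs6 (by decide) (by decide) (by decide) (by decide),
    show ["MKT_VALUE", "mkt_value", "Market_Value", "MARKET_VALUE", "MKTVALUE"] = pvEs6.map (·.2) from rfl,
    pvFind_map_snd]
  exact pvStage_eq fm "mkt_value" _

def pvEs7 : List (Nat × String) := [(0,"GIS_AREA"),(1,"gis_area"),(2,"Gis_Area"),(3,"AREA"),(4,"area"),(5,"ACREAGE"),(6,"acreage")]

theorem pvStageEq7 (sample_props : List (String × String)) (fm : PySem.Dict String String) :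
    pvALoop sample_props fm "gis_area" ["GIS_AREA", "gis_area", "Gis_Area", "AREA", "area", "ACREAGE", "acreage"] =
    (match PySem.Dict.get? (sample_props.foldl pvStep (PySem.Dict.empty : PySem.Dict String (Nat × String))) "gis_area" with
     | some rk => fm.insert "gis_area" rk.2
     | none => fm) := by
  rw [pvALoop_eq_find,
    pvBest_get? sample_props "gis_area" pvEs7 (by decide) (by decide) (by decide) (by decide),
    show ["GIS_AREA", "gis_area", "Gis_Area", "AREA", "area", "ACREAGE", "acreage"] = pvEs7.map (·.2) from rfl,
    pvFind_map_snd]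
  exact pvStage_eq fm "gis_area" _

-- ===== VERDICT (by name: the statement is the Claim_ definition above) =====
theorem detect_property_fields_spec : Claim_equal_detect_property_fields := by
  intro sample_props _
  unfold Spec_detect_property_fields detect_property_fields detect_property_fields_alt pvTargets
  simp only [List.foldl_cons, List.foldl_nil]
  rw [pvStageEq1, pvStageEq2, pvStageEq3, pvStageEq4, pvStageEq5, pvStageEq6, pvStageEq7]
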